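-- pv_equiv track=rewrite | github.com/MingXu-123/CMU-15112-HW | 15112-CMU/week10/practice.py | ct2
-- ===== SOURCE A (Python) =====
-- def ct2(d):
--    for k in d:
--        if k % 2 == 0:
--            d[k + 1] = k + 1
--    a = set()
--    for k1 in d:
--        for k2 in d:
--            if k1 != k2 and d[k1] == d[k2]:
--                a.add((k1,k2))
--    return a
-- ===== SOURCE B (Python) =====
-- def ct2(d):
--     # Same in-place first pass as the original (mutates d; raises RuntimeError
--     # identically when an even key's successor is missing).
--     for k in d:
--         if k % 2 == 0:
--             d[k + 1] = k + 1
--     # Group keys by value once, then list out the ordered equal-value pairs in a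
--     # single comprehension and turn that list into the result set.
--     buckets = {}
--     for k, v in d.items():
--         buckets.setdefault(v, []).append(k)
--     pairs = [(k1, k2)
--              for k1 in d
--              for k2 in buckets[d[k1]]
--              if k2 != k1]
--     return set(pairs)
-- ===== Notes on version B (the rewrite author's own statement) =====
-- stated objective: alternative
-- what changed: A's O(n^2) nested all-pairs scan over the dict is replaced by grouping keys by value in one pass and listing the ordered equal-value pairs of each bucket in a single flat comprehension collected into a set; the first (mutating) loop is kept verbatim so the in-place update and the RuntimeError behavior are identical.
import Mathlib
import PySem

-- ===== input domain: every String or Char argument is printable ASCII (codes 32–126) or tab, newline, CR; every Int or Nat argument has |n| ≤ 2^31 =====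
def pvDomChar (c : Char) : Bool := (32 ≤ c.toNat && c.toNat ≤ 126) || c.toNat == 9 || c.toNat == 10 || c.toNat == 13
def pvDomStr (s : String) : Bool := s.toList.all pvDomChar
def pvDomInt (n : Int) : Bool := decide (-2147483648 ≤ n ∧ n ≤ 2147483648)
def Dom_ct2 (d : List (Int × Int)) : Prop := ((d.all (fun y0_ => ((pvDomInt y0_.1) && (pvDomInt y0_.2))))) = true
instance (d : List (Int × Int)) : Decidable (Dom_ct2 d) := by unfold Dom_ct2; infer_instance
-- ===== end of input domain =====

-- B keeps A's in-place first pass (same mutation, same RuntimeError) but replaces the nested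
-- all-pairs scan by a value->keys grouping plus one flat pair comprehension turned into a set.

-- ===== PORT A =====
-- first loop is exact under Pre_ct2 (no dict-size change, so live iteration = iteration over the
-- original keys); d[k1] == d[k2] is ported as get? equality (both keys are present, so exact)
def ct2 (d : List (Int × Int)) : List (Int × Int) :=
  let d0 := PySem.Dict.ofList d
  let d1 := d0.keys.foldl
    (fun dd k => if PySem.Int.mod k 2 == 0 then dd.insert (k + 1) (k + 1) else dd) d0
  d1.keys.foldl (fun a k1 =>
      d1.keys.foldl (fun a k2 =>
          if k1 != k2 && d1.get? k1 == d1.get? k2 then PySem.Set.add a (k1, k2) else a) a)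
    (PySem.Set.empty)

-- ===== PORT B =====
-- same first loop as A (B's Python keeps it verbatim); buckets.setdefault(v,[]).append(k) is
-- Dict.modify v [] (· ++ [k]); the list comprehension is flatMap/filter/map; set(pairs) is Set.ofList;
-- d[k] on a key of d is getD k 0 (exact)
def ct2_alt (d : List (Int × Int)) : List (Int × Int) :=
  let d0 := PySem.Dict.ofList d
  let d1 := d0.keys.foldl
    (fun dd k => if PySem.Int.mod k 2 == 0 then dd.insert (k + 1) (k + 1) else dd) d0
  let buckets := d1.items.foldl
    (fun m p => m.modify p.2 [] (fun l => l ++ [p.1])) PySem.Dict.empty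
  let pairs := d1.keys.flatMap (fun k1 =>
    ((buckets.getD (d1.getD k1 0) []).filter (fun k2 => k2 != k1)).map (fun k2 => (k1, k2)))
  PySem.Set.ofList pairs

-- ===== PRECONDITION & SPEC =====
-- Pre_: Python A raises RuntimeError ("dictionary changed size during iteration") whenever some
-- even key k has k+1 absent; exactly those inputs are excluded (B raises there too).
def Pre_ct2 (d : List (Int × Int)) : Prop :=
  ∀ k ∈ d.map Prod.fst, PySem.Int.mod k 2 = 0 → (k + 1) ∈ d.map Prod.fst
instance (d : List (Int × Int)) : Decidable (Pre_ct2 d) := by unfold Pre_ct2; infer_instance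
def pvWitness_ct2 : (List (Int × Int)) := [(1, 5), (2, 7), (3, 5)]
def Spec_ct2 (d : List (Int × Int)) (out : List (Int × Int)) : Prop := out = ct2_alt d
instance (d : List (Int × Int)) (out : List (Int × Int)) : Decidable (Spec_ct2 d out) := by unfold Spec_ct2; infer_instance

-- ===== CLAIM (what is proved, stated in full; the proofs are below) =====
def Claim_equal_ct2 : Prop := ∀ (d : List (Int × Int)), Dom_ct2 d → Pre_ct2 d → Spec_ct2 d (ct2 d)

-- ===== LEMMAS AND PROOFS =====

-- keys stay Nodup through the first loop (the step is an insert or the identity)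
lemma nodup_keys_loop1 (l : List Int) (d0 : PySem.Dict Int Int) (h : d0.keys.Nodup) :
    (l.foldl (fun dd k => if PySem.Int.mod k 2 == 0 then dd.insert (k + 1) (k + 1) else dd)
      d0).keys.Nodup := by
  induction l generalizing d0 with
  | nil => exact h
  | cons x xs ih =>
      simp only [List.foldl_cons]
      split
      · exact ih _ (PySem.Dict.nodup_keys_insert _ _ _ h)
      · exact ih _ h

lemma get?_eq_some_getD (d1 : PySem.Dict Int Int) (k : Int) (h : k ∈ d1.keys) :
    d1.get? k = some (d1.getD k 0) := by
  have hc : d1.contains k = true := (PySem.Dict.contains_iff_mem_keys d1 k).mpr h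
  rw [PySem.Dict.contains_eq_isSome_get?] at hc
  obtain ⟨v, hv⟩ := Option.isSome_iff_exists.mp hc
  rw [PySem.Dict.getD_eq_get?_getD, hv]; rfl

-- the value->keys bucket at v is exactly the keys of d1 holding value v, in key order
lemma bucket_getD (d1 : PySem.Dict Int Int) (hnd : d1.keys.Nodup) (v : Int) :
    (d1.items.foldl (fun m p => m.modify p.2 [] (fun l => l ++ [p.1]))
        (PySem.Dict.empty : PySem.Dict Int (List Int))).getD v []
      = d1.keys.filter (fun k => d1.getD k 0 == v) := by
  have hmap : d1.items.foldl (fun m p => m.modify p.2 [] (fun l => l ++ [p.1]))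
      (PySem.Dict.empty : PySem.Dict Int (List Int))
      = (d1.items.map (fun p => (p.2, p.1))).foldl
          (fun m p => m.modify p.1 [] (fun l => l ++ [p.2])) PySem.Dict.empty := by
    rw [List.foldl_map]
  rw [hmap, PySem.Dict.getD_foldl_modify_append, PySem.Dict.getD_empty,
    PySem.Dict.items_eq_map_keys d1 hnd 0]
  simp [List.filter_map, Function.comp_def]

-- folding over a flatMap is the nested fold
lemma foldl_flatMap {α β γ : Type} (l : List α) (f : α → List β) (g : γ → β → γ) (i : γ) :
    (l.flatMap f).foldl g i = l.foldl (fun a x => (f x).foldl g a) i := by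
  induction l generalizing i with
  | nil => rfl
  | cons x xs ih => simp [List.flatMap_cons, List.foldl_append, ih]

theorem ct2_spec : Claim_equal_ct2 := by
  intro d _ _
  unfold Spec_ct2 ct2 ct2_alt
  simp only []
  set d0 := PySem.Dict.ofList d with hd0
  set d1 := d0.keys.foldl
    (fun dd k => if PySem.Int.mod k 2 == 0 then dd.insert (k + 1) (k + 1) else dd) d0 with hd1
  have hnd : d1.keys.Nodup := nodup_keys_loop1 _ _ (PySem.Dict.nodup_keys_ofList d)
  rw [PySem.Set.ofList_eq_foldl, foldl_flatMap]
  apply PySem.List.foldl_congr_mem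
  intro a k1 hk1
  rw [bucket_getD d1 hnd, List.foldl_map, List.foldl_filter, List.foldl_filter]
  apply PySem.List.foldl_congr_mem
  intro a' k2 hk2
  rw [get?_eq_some_getD d1 k1 hk1, get?_eq_some_getD d1 k2 hk2]
  by_cases hk : k1 = k2
  · subst hk; simp
  · by_cases hv : d1.getD k1 0 = d1.getD k2 0
    · simp [hk, Ne.symm hk, hv]
    · simp [hk, hv, Ne.symm hv]
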